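-- pv_equiv track=rewrite | github.com/alarichartsock/CS331 | 3/analysis.py | generateVocabulary
-- ===== SOURCE A (Python) =====
-- def generateVocabulary(data):
--     """
--     Generates a unique set of words sorted alphabetically derived from the training data.
--     """
--     vocab = []
--
--     # For i in data, append to vocab if it doesn't already exist in vocab
--     for i in data:
--         i = i[0]
--         for j in i:
--             if j in vocab:
--                 pass
--             else:
--                 vocab.append(j)
--
--     # Sort vocab (done alphabetically)
--     vocab = sorted(vocab)
--
--     # Return vocab for futher usage
--     return vocab
-- ===== SOURCE B (Python) =====
-- def generateVocabulary(data):
--     """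
--     Generates a unique set of words sorted alphabetically derived from the training data.
--     """
--     # Collect every word (duplicates included), sort once, then drop adjacent duplicates.
--     words = []
--     for i in data:
--         words.extend(i[0])
--     words.sort()
--     vocab = []
--     for w in words:
--         if vocab and w == vocab[-1]:
--             continue
--         vocab.append(w)
--     return vocab
-- ===== Notes on version B (the rewrite author's own statement) =====
-- stated objective: faster
-- what changed: B flattens all words without deduping, sorts the full list once, and removes duplicates in a single linear pass comparing each word to the previously kept one, instead of A's quadratic membership-test dedup during collection followed by a sort.
import Mathlib
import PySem

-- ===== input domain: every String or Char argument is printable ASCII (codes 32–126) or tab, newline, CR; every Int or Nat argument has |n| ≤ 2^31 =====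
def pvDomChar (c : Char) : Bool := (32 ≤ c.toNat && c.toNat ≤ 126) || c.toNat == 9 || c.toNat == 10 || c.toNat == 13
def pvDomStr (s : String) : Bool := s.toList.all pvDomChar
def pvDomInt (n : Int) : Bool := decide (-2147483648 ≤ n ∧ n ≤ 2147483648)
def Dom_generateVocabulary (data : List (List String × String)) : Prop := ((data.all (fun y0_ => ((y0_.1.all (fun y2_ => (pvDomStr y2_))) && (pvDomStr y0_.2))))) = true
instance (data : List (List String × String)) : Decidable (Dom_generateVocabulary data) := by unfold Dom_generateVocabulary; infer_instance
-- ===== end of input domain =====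

-- B collects all words with duplicates, sorts once, and dedups adjacent entries in one
-- linear pass, instead of A's membership-test dedup during collection followed by a sort.

-- ===== PORT A =====
def generateVocabulary (data : List (List String × String)) : List String :=
  let vocab := data.foldl (fun vocab i =>
    i.1.foldl (fun v j => if j ∈ v then v else v ++ [j]) vocab) []
  PySem.List.sorted vocab (fun x => x) false

-- ===== PORT B =====
def generateVocabulary_alt (data : List (List String × String)) : List String :=
  let words := data.foldl (fun ws i => ws ++ i.1) []
  let ws := PySem.List.sorted words (fun x => x) false
  ws.foldl (fun v w => if v.getLast? = some w then v else v ++ [w]) []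

-- ===== PRECONDITION & SPEC =====
def Spec_generateVocabulary (data : List (List String × String)) (out : List String) : Prop := out = generateVocabulary_alt data
instance (data : List (List String × String)) (out : List String) : Decidable (Spec_generateVocabulary data out) := by unfold Spec_generateVocabulary; infer_instance

-- ===== CLAIM (what is proved, stated in full; the proofs are below) =====
def Claim_equal_generateVocabulary : Prop := ∀ (data : List (List String × String)), Dom_generateVocabulary data → Spec_generateVocabulary data (generateVocabulary data)

-- ===== LEMMAS AND PROOFS =====

-- A's inner loop: membership-test append keeps nodup and collects exactly v ∪ xs.
lemma innerA_inv (xs : List String) : ∀ v : List String, v.Nodup →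
    (xs.foldl (fun v j => if j ∈ v then v else v ++ [j]) v).Nodup ∧
    ∀ x, x ∈ xs.foldl (fun v j => if j ∈ v then v else v ++ [j]) v ↔ x ∈ v ∨ x ∈ xs := by
  induction xs with
  | nil => intro v hv; simpa using hv
  | cons a t ih =>
    intro v hv
    simp only [List.foldl_cons]
    by_cases h : a ∈ v
    · simp only [if_pos h]
      rcases ih v hv with ⟨h1, h2⟩
      refine ⟨h1, fun x => ?_⟩
      rw [h2]
      constructor
      · rintro (hx | hx)
        · exact Or.inl hx
        · exact Or.inr (List.mem_cons_of_mem _ hx)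
      · rintro (hx | hx)
        · exact Or.inl hx
        · rcases List.mem_cons.mp hx with rfl | hx
          · exact Or.inl h
          · exact Or.inr hx
    · simp only [if_neg h]
      rcases ih (v ++ [a]) (by simp [List.nodup_append, hv]; exact fun a1 ha1 heq => h (heq ▸ ha1)) with ⟨h1, h2⟩
      refine ⟨h1, fun x => ?_⟩
      rw [h2]
      simp only [List.mem_append, List.mem_cons]
      tauto

-- A's outer loop: vocab is nodup and holds exactly the words of all first components.
lemma vocabA_inv (data : List (List String × String)) : ∀ v : List String, v.Nodup →
    (data.foldl (fun vocab i => i.1.foldl (fun v j => if j ∈ v then v else v ++ [j]) vocab) v).Nodup ∧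
    ∀ x, x ∈ data.foldl (fun vocab i => i.1.foldl (fun v j => if j ∈ v then v else v ++ [j]) vocab) v ↔
      x ∈ v ∨ ∃ p ∈ data, x ∈ p.1 := by
  induction data with
  | nil => intro v hv; simpa using hv
  | cons d rest ih =>
    intro v hv
    simp only [List.foldl_cons]
    rcases innerA_inv d.1 v hv with ⟨h1, h2⟩
    rcases ih _ h1 with ⟨h3, h4⟩
    refine ⟨h3, fun x => ?_⟩
    rw [h4]
    simp only [h2, List.mem_cons]
    constructor
    · rintro ((hx | hx) | ⟨p, hp, hxp⟩)
      · exact Or.inl hx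
      · exact Or.inr ⟨d, Or.inl rfl, hx⟩
      · exact Or.inr ⟨p, Or.inr hp, hxp⟩
    · rintro (hx | ⟨p, (rfl | hp), hxp⟩)
      · exact Or.inl (Or.inl hx)
      · exact Or.inl (Or.inr hxp)
      · exact Or.inr ⟨p, hp, hxp⟩

-- B's flattening loop collects exactly the words of all first components.
lemma wordsB_mem (data : List (List String × String)) : ∀ acc : List String, ∀ x,
    x ∈ data.foldl (fun ws i => ws ++ i.1) acc ↔ x ∈ acc ∨ ∃ p ∈ data, x ∈ p.1 := by
  induction data with
  | nil => intro acc x; simp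
  | cons d rest ih =>
    intro acc x
    simp only [List.foldl_cons, ih, List.mem_append, List.mem_cons]
    constructor
    · rintro ((hx | hx) | ⟨p, hp, hxp⟩)
      · exact Or.inl hx
      · exact Or.inr ⟨d, Or.inl rfl, hx⟩
      · exact Or.inr ⟨p, Or.inr hp, hxp⟩
    · rintro (hx | ⟨p, (rfl | hp), hxp⟩)
      · exact Or.inl (Or.inl hx)
      · exact Or.inl (Or.inr hxp)
      · exact Or.inr ⟨p, hp, hxp⟩

-- in a strictly increasing list every element is ≤ the last one
lemma le_getLast_of_pairwise_lt : ∀ (v : List String) (l : String), v.getLast? = some l →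
    v.Pairwise (· < ·) → ∀ a ∈ v, a ≤ l := by
  intro v
  induction v with
  | nil => intro l hl; simp at hl
  | cons b t ih =>
    intro l hl hp a ha
    cases t with
    | nil =>
      simp at hl ha
      simp [ha, hl]
    | cons c u =>
      rw [List.getLast?_cons_cons] at hl
      rcases List.mem_cons.mp ha with rfl | ha
      · have hcl : c ≤ l := ih l hl hp.of_cons c (List.mem_cons_self ..)
        exact le_of_lt (lt_of_lt_of_le (List.rel_of_pairwise_cons hp (List.mem_cons_self ..)) hcl)
      · exact ih l hl hp.of_cons a ha

-- B's dedup pass: over a sorted list it yields a strictly increasing list with the same members.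
lemma adjB_inv : ∀ (ws v : List String), ws.Pairwise (· ≤ ·) → v.Pairwise (· < ·) →
    (∀ a ∈ v, ∀ b ∈ ws, a ≤ b) →
    (ws.foldl (fun v w => if v.getLast? = some w then v else v ++ [w]) v).Pairwise (· < ·) ∧
    ∀ x, x ∈ ws.foldl (fun v w => if v.getLast? = some w then v else v ++ [w]) v ↔ x ∈ v ∨ x ∈ ws := by
  intro ws
  induction ws with
  | nil => intro v _ hv _; simpa using hv
  | cons w t ih =>
    intro v hws hv hle
    simp only [List.foldl_cons]
    have hwt : ∀ b ∈ t, w ≤ b := fun b hb => List.rel_of_pairwise_cons hws hb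
    by_cases h : v.getLast? = some w
    · simp only [if_pos h]
      have hwv : w ∈ v := List.mem_of_getLast? h
      rcases ih v hws.of_cons hv (fun a ha b hb => hle a ha b (List.mem_cons_of_mem _ hb)) with ⟨h1, h2⟩
      refine ⟨h1, fun x => ?_⟩
      rw [h2]
      simp only [List.mem_cons]
      constructor
      · rintro (hx | hx)
        · exact Or.inl hx
        · exact Or.inr (Or.inr hx)
      · rintro (hx | rfl | hx)
        · exact Or.inl hx
        · exact Or.inl hwv
        · exact Or.inr hx
    · simp only [if_neg h]
      have hlt : ∀ a ∈ v, a < w := by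
        intro a ha
        rcases lt_or_eq_of_le (hle a ha w (List.mem_cons_self ..)) with hlt | rfl
        · exact hlt
        cases hv' : v.getLast? with
        | none => exact absurd (List.getLast?_eq_none_iff.mp hv' ▸ ha) (List.not_mem_nil)
        | some l =>
          have h1 : a ≤ l := le_getLast_of_pairwise_lt v l hv' hv a ha
          have h2 : l ≤ a := hle l (List.mem_of_getLast? hv') a (List.mem_cons_self ..)
          exact absurd (hv' ▸ congrArg some (le_antisymm h2 h1)) h
      have hv' : (v ++ [w]).Pairwise (· < ·) := by
        rw [List.pairwise_append]
        exact ⟨hv, List.pairwise_singleton _ _, fun a ha b hb => (List.mem_singleton.mp hb) ▸ hlt a ha⟩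
      have hle' : ∀ a ∈ v ++ [w], ∀ b ∈ t, a ≤ b := by
        intro a ha b hb
        rcases List.mem_append.mp ha with ha | ha
        · exact hle a ha b (List.mem_cons_of_mem _ hb)
        · exact (List.mem_singleton.mp ha) ▸ hwt b hb
      rcases ih (v ++ [w]) hws.of_cons hv' hle' with ⟨h1, h2⟩
      refine ⟨h1, fun x => ?_⟩
      rw [h2]
      simp only [List.mem_append, List.mem_cons]
      tauto

-- ===== VERDICT (by name: the statement is the Claim_ definition above) =====
theorem generateVocabulary_spec : Claim_equal_generateVocabulary := by
  intro data _
  unfold Spec_generateVocabulary generateVocabulary generateVocabulary_alt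
  simp only []
  set vocab := data.foldl (fun vocab i =>
    i.1.foldl (fun v j => if j ∈ v then v else v ++ [j]) vocab) [] with hvocab
  set words := data.foldl (fun ws i => ws ++ i.1) [] with hwords
  set ws := PySem.List.sorted words (fun x => x) false with hws
  set r := ws.foldl (fun v w => if v.getLast? = some w then v else v ++ [w]) [] with hr
  obtain ⟨hnodupA, hmemA⟩ := vocabA_inv data [] List.nodup_nil
  have hwsord : ws.Pairwise (· ≤ ·) := PySem.List.sorted_pairwise words (fun x => x) 
  obtain ⟨hrlt, hrmem⟩ := adjB_inv ws [] hwsord List.Pairwise.nil (by simp)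
  have hmemr : ∀ x, x ∈ r ↔ x ∈ vocab := by
    intro x
    rw [hrmem x, hmemA x]
    simp only [List.not_mem_nil, false_or]
    rw [hws, PySem.List.mem_sorted, hwords, wordsB_mem data [] x]
    simp
  have hperm : r.Perm vocab := by
    rw [List.perm_ext_iff_of_nodup (hrlt.imp ne_of_lt) hnodupA]
    exact hmemr
  exact PySem.List.sorted_eq_of_perm_of_pairwise_lt vocab r (fun x => x) hperm hrlt
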